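-- pv_equiv track=rewrite | github.com/rtmendes/mngr | libs/mng_mind/imbue/mng_mind/event_watcher.py | _cumulative_idle_delay_minutes
-- ===== SOURCE A (Python) =====
-- def _cumulative_idle_delay_minutes(schedule: tuple[int, ...], event_index: int) -> int:
--     """Calculate the cumulative delay in minutes for the nth idle event (0-indexed).
--
--     For schedule [1, 10, 60] and event_index=2, returns 1+10+60=71.
--     For event_index >= len(schedule), the last value repeats.
--     """
--     total = 0
--     for i in range(event_index + 1):
--         if i < len(schedule):
--             total += schedule[i]
--         else:
--             total += schedule[-1]
--     return total
-- ===== SOURCE B (Python) =====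
-- def _cumulative_idle_delay_minutes(schedule, event_index):
--     n = event_index + 1
--     if n <= 0:
--         return 0
--     k = min(n, len(schedule))
--     total = sum(schedule[0:k])
--     if k < n:
--         total += (n - k) * schedule[-1]
--     return total
-- ===== Notes on version B (the rewrite author's own statement) =====
-- stated objective: faster
-- what changed: Replaces the per-event loop with a closed form: sum the prefix of the schedule once and add (remaining event count) * last value by multiplication.
import Mathlib
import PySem

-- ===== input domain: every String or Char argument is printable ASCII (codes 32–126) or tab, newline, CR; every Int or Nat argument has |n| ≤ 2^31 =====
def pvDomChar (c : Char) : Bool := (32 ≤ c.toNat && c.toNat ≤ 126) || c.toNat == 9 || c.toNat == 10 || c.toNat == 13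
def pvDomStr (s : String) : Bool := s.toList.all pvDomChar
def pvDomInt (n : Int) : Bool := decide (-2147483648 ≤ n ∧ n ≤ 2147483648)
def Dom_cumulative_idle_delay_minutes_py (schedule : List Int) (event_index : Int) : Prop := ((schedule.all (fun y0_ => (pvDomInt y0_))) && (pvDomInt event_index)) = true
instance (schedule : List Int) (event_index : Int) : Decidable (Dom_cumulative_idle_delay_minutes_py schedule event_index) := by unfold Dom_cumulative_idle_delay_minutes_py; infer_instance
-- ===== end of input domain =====

-- B replaces A's per-event loop with a closed form (prefix sum + multiplication); proved equal on Pre_ (nonempty schedule, or negative event_index where A returns 0).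


-- ===== PORT A =====
-- literal port of A: total = 0; for i in range(event_index+1): total += schedule[i] if i < len(schedule) else schedule[-1]
def cumulative_idle_delay_minutes_py (schedule : List Int) (event_index : Int) : Int :=
  (PySem.List.pyRange 0 (event_index + 1) 1).foldl
    (fun total i =>
      if i < (schedule.length : Int) then total + PySem.List.pyGetD schedule i 0
      else total + PySem.List.pyGetD schedule (-1) 0) 0

-- ===== PORT B =====
-- literal port of Source B: prefix sum once, plus (n - k) * schedule[-1]
def cumulative_idle_delay_minutes_py_alt (schedule : List Int) (event_index : Int) : Int :=
  let n := event_index + 1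
  if n ≤ 0 then 0
  else
    let k := min n (schedule.length : Int)
    let total := (PySem.List.slice schedule (some 0) (some k)).sum
    if k < n then total + (n - k) * PySem.List.pyGetD schedule (-1) 0
    else total

-- ===== PRECONDITION & SPEC =====
-- Pre_ excludes exactly the inputs where A raises IndexError (schedule[-1] on an empty schedule, reached iff event_index ≥ 0).
def Pre_cumulative_idle_delay_minutes_py (schedule : List Int) (event_index : Int) : Prop :=
  schedule ≠ [] ∨ event_index < 0
instance (schedule : List Int) (event_index : Int) : Decidable (Pre_cumulative_idle_delay_minutes_py schedule event_index) := by unfold Pre_cumulative_idle_delay_minutes_py; infer_instance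

def pvWitness_cumulative_idle_delay_minutes_py : List Int × Int := ([1, 10, 60], 2)

def Spec_cumulative_idle_delay_minutes_py (schedule : List Int) (event_index : Int) (out : Int) : Prop := out = cumulative_idle_delay_minutes_py_alt schedule event_index
instance (schedule : List Int) (event_index : Int) (out : Int) : Decidable (Spec_cumulative_idle_delay_minutes_py schedule event_index out) := by unfold Spec_cumulative_idle_delay_minutes_py; infer_instance

-- ===== CLAIM (what is proved, stated in full; the proofs are below) =====
def Claim_equal_cumulative_idle_delay_minutes_py : Prop := ∀ (schedule : List Int) (event_index : Int), Dom_cumulative_idle_delay_minutes_py schedule event_index → Pre_cumulative_idle_delay_minutes_py schedule event_index → Spec_cumulative_idle_delay_minutes_py schedule event_index (cumulative_idle_delay_minutes_py schedule event_index)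

-- ===== LEMMAS AND PROOFS =====

-- A's loop over range(m) in closed form: prefix sum of the first m entries plus (m - len) copies of the last.
theorem loopA_closed (schedule : List Int) (m : Nat) :
    (PySem.List.pyRange 0 (m : Int) 1).foldl
      (fun total i =>
        if i < (schedule.length : Int) then total + PySem.List.pyGetD schedule i 0
        else total + PySem.List.pyGetD schedule (-1) 0) 0
    = (schedule.take m).sum + ((m - schedule.length : Nat) : Int) * PySem.List.pyGetD schedule (-1) 0 := by
  induction m with
  | zero => simp
  | succ m ih =>
    have h : ((m : Int) + 1) = ((m + 1 : Nat) : Int) := by push_cast; ring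
    rw [← h, PySem.List.pyRange_one_succ_right (by positivity), List.foldl_append, ih]
    simp only [List.foldl_cons, List.foldl_nil]
    by_cases hm : m < schedule.length
    · rw [if_pos (by exact_mod_cast hm)]
      rw [PySem.List.pyGetD_natCast, List.getD_eq_getElem _ _ hm, List.sum_take_succ _ _ hm]
      have : m + 1 - schedule.length = 0 := by omega
      have h0 : m - schedule.length = 0 := by omega
      rw [this, h0]
      push_cast; ring
    · rw [if_neg (by exact_mod_cast hm)]
      have hle : schedule.length ≤ m := by omega
      rw [List.take_of_length_le hle, List.take_of_length_le (by omega)]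
      have : (m + 1 - schedule.length : Nat) = (m - schedule.length) + 1 := by omega
      rw [this]
      push_cast; ring

-- ===== VERDICT (by name: the statement is the Claim_ definition above) =====
theorem cumulative_idle_delay_minutes_py_spec : Claim_equal_cumulative_idle_delay_minutes_py := by
  intro schedule event_index _ hpre
  unfold Spec_cumulative_idle_delay_minutes_py cumulative_idle_delay_minutes_py cumulative_idle_delay_minutes_py_alt
  by_cases hneg : event_index + 1 ≤ 0
  · rw [if_pos hneg, PySem.List.pyRange_one_eq_nil (by omega)]
    rfl
  · rw [if_neg hneg]
    dsimp only
    have hm : (event_index + 1) = (((event_index + 1).toNat : Nat) : Int) := by omega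
    set m : Nat := (event_index + 1).toNat with hmdef
    rw [hm, loopA_closed schedule m]
    have hk : min ((m : Int)) ((schedule.length : Int)) = ((min m schedule.length : Nat) : Int) := by
      omega
    rw [hk, PySem.List.slice_zero_start, PySem.List.slice_to_natCast]
    by_cases hlt : ((min m schedule.length : Nat) : Int) < (m : Int)
    · rw [if_pos hlt]
      have hlen : schedule.length < m := by omega
      have h1 : min m schedule.length = schedule.length := by omega
      rw [h1, List.take_of_length_le (le_refl _), List.take_of_length_le (by omega)]
      have h2 : ((m - schedule.length : Nat) : Int) = (m : Int) - (schedule.length : Int) := by omega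
      rw [h2]
    · rw [if_neg hlt]
      have hle : m ≤ schedule.length := by omega
      have h1 : min m schedule.length = m := by omega
      have h2 : (m - schedule.length : Nat) = 0 := by omega
      rw [h1, h2]
      simp
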